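-- pv_equiv track=rewrite | github.com/kegma1/grunnleggende-programmering | oblig5/findgenes.py | findGenes
-- ===== SOURCE A (Python) =====
-- def findGenes(genome : str) -> list:
--     startSeq = "ATG"
--     stopSeqs = ["TAG", "TAA", "TGA"]
--     def findGene(seq: str) -> str | None:
--         possibleSeqs = [seq[i:i+3] for i in range(0, len(seq), 3)]
--         endIndex = 0
--         for i, seq in enumerate(possibleSeqs):
--             if seq == startSeq:
--                 return None
--             if seq in stopSeqs:
--                 endIndex = i
--                 break
--         else: # We return none if we dont find an ending. the else branch after a for-loop only activate if the loop ends normally (not breaking).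
--             return None
--         finalSeq = possibleSeqs[0:endIndex]
--         if len(finalSeq) == 0:
--             return
--         return "".join(finalSeq)
--     geneList = []
--     currentSeq = ""
--     i = 0
--     while i < len(genome):
--         currentSeq = genome[i:i+3]
--
--         if currentSeq == startSeq:
--             geneSeq = findGene(genome[i+3:len(genome)])
--             if geneSeq != None:
--                 geneList.append(geneSeq)
--                 i += len(geneSeq)
--         i += 1
--     if len(geneList) == 0:
--         geneList.append("No genes found")
--     return geneList
-- ===== SOURCE B (Python) =====
-- def findGenes(genome: str) -> list:
--     # Alternative algorithm: per-frame backward precompute of next ATG / next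
--     # stop codon start, so each ATG is decided from the tables instead of by
--     # rescanning the suffix codon by codon.
--     n = len(genome)
--     STOPS = ("TAG", "TAA", "TGA")
--     nextStart = [None] * (n + 3)
--     nextStop = [None] * (n + 3)
--     for p in range(n - 1, -1, -1):
--         cod = genome[p:p + 3]
--         nextStart[p] = p if cod == "ATG" else nextStart[p + 3]
--         nextStop[p] = p if cod in STOPS else nextStop[p + 3]
--     genes = []
--     i = 0
--     while i < n:
--         if genome[i:i + 3] == "ATG":
--             p = i + 3
--             sp = nextStop[p] if p < n else None
--             st = nextStart[p] if p < n else None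
--             if sp is not None and sp > p and (st is None or sp < st):
--                 gene = genome[p:sp]
--                 genes.append(gene)
--                 i += len(gene)
--         i += 1
--     return genes if genes else ["No genes found"]
-- ===== Notes on version B (the rewrite author's own statement) =====
-- stated objective: alternative
-- what changed: A rescans the remaining suffix codon-by-codon at every ATG it meets; B precomputes, per reading frame, backward tables of the next ATG and next stop codon start and decides each ATG from those tables.
import Mathlib
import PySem

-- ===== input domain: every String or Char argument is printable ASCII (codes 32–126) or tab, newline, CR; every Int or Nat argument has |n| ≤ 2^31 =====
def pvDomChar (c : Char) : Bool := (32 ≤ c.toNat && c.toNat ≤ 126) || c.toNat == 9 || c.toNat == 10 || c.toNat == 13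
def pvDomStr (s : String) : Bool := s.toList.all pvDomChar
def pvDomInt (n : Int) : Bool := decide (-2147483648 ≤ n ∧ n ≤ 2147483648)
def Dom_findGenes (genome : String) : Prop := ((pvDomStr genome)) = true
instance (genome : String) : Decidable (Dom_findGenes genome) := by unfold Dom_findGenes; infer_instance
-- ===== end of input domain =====

-- B replaces A's per-ATG codon-by-codon rescan of the remaining suffix by per-frame next-ATG/next-stop tables, a different table-based algorithm (alternative; same measured cost on the tested inputs).

-- shared codon literal helpers (both Pythons write the same literals and genome[i:i+3])
def pvATG : List Char := ['A', 'T', 'G']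
def pvStops : List (List Char) := [['T', 'A', 'G'], ['T', 'A', 'A'], ['T', 'G', 'A']]
def pvCodon (g : List Char) (i : Nat) : List Char :=
  PySem.List.slice g (some (i : Int)) (some ((i + 3 : Nat) : Int))

-- ===== PORT A =====
-- possibleSeqs = [seq[i:i+3] for i in range(0, len(seq), 3)]
def pvChunks (s : List Char) : List (List Char) :=
  (PySem.List.pyRange 0 (s.length : Int) 3).map
    (fun i => PySem.List.slice s (some i) (some (i + 3)))

-- the for/enumerate loop with break (some endIndex) / return None and normal end (none)
def pvScan : List (List Char) → Nat → Option Nat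
  | [], _ => none
  | c :: rest, i =>
    if c = pvATG then none
    else if c ∈ pvStops then some i
    else pvScan rest (i + 1)

def pvFindGene (s : List Char) : Option (List Char) :=
  let chunks := pvChunks s
  match pvScan chunks 0 with
  | none => none
  | some e =>
    let fin := PySem.List.slice chunks (some 0) (some (e : Int))   -- possibleSeqs[0:endIndex]
    if fin.length = 0 then none else some fin.flatten              -- "".join(finalSeq)

def pvLoopA (g : List Char) (i : Nat) (acc : List (List Char)) : List (List Char) :=
  if h : i < g.length then
    if pvCodon g i = pvATG then
      match pvFindGene (PySem.List.slice g (some ((i + 3 : Nat) : Int)) (some (g.length : Int))) with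
      | some gene => pvLoopA g (i + gene.length + 1) (acc ++ [gene])
      | none => pvLoopA g (i + 1) acc
    else pvLoopA g (i + 1) acc
  else acc
termination_by g.length - i
decreasing_by all_goals omega

def findGenes (genome : String) : List String :=
  let gl := pvLoopA genome.toList 0 []
  if gl.length = 0 then ["No genes found"] else gl.map String.ofList

-- ===== PORT B =====
-- backward table fill 'ns[p] = p if codon matches else ns[p+3]' rendered as the recursion each entry satisfies
def pvNextStart (g : List Char) (p : Nat) : Option Nat :=
  if h : p < g.length then
    if pvCodon g p = pvATG then some p else pvNextStart g (p + 3)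
  else none
termination_by g.length - p
decreasing_by omega

def pvNextStop (g : List Char) (p : Nat) : Option Nat :=
  if h : p < g.length then
    if pvCodon g p ∈ pvStops then some p else pvNextStop g (p + 3)
  else none
termination_by g.length - p
decreasing_by omega

def pvLoopB (g : List Char) (i : Nat) (acc : List (List Char)) : List (List Char) :=
  if h : i < g.length then
    if pvCodon g i = pvATG then
      let p := i + 3
      let sp := if p < g.length then pvNextStop g p else none
      let st := if p < g.length then pvNextStart g p else none
      match sp with
      | some q =>
        if decide (p < q) && (match st with | none => true | some r => decide (q < r)) then
          let gene := PySem.List.slice g (some (p : Int)) (some (q : Int))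
          pvLoopB g (i + gene.length + 1) (acc ++ [gene])
        else pvLoopB g (i + 1) acc
      | none => pvLoopB g (i + 1) acc
    else pvLoopB g (i + 1) acc
  else acc
termination_by g.length - i
decreasing_by all_goals omega

def findGenes_alt (genome : String) : List String :=
  let gl := pvLoopB genome.toList 0 []
  if gl.length = 0 then ["No genes found"] else gl.map String.ofList

-- ===== PRECONDITION & SPEC =====
def Spec_findGenes (genome : String) (out : List String) : Prop := out = findGenes_alt genome
instance (genome : String) (out : List String) : Decidable (Spec_findGenes genome out) := by unfold Spec_findGenes; infer_instance

-- ===== CLAIM (what is proved, stated in full; the proofs are below) =====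
def Claim_equal_findGenes : Prop := ∀ (genome : String), Dom_findGenes genome → Spec_findGenes genome (findGenes genome)

-- ===== LEMMAS AND PROOFS =====

theorem pvCodon_eq (g : List Char) (p : Nat) : pvCodon g p = (g.drop p).take 3 := by
  unfold pvCodon
  rw [PySem.List.slice_natCast]
  congr 1
  omega

theorem pvChunks_nil : pvChunks [] = [] := by
  simp [pvChunks, PySem.List.pyRange_of_pos (0 : Int) 0 (by norm_num : (0:Int) < 3)]

theorem pvChunks_cons (s : List Char) (h : s ≠ []) :
    pvChunks s = s.take 3 :: pvChunks (s.drop 3) := by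
  have hlen : 0 < s.length := List.length_pos_iff.mpr h
  unfold pvChunks
  rw [PySem.List.pyRange_of_pos _ _ (by norm_num : (0:Int) < 3),
      PySem.List.pyRange_of_pos _ _ (by norm_num : (0:Int) < 3)]
  have hcnt : (if (0:Int) < (s.length : Int) then (((s.length : Int) - 0 + 3 - 1) / 3).toNat else 0)
      = (s.length + 2) / 3 := by
    rw [if_pos (by exact_mod_cast hlen)]
    omega
  have hcnt' : (if (0:Int) < ((s.drop 3).length : Int) then ((((s.drop 3).length : Int) - 0 + 3 - 1) / 3).toNat else 0)
      = (s.length + 2) / 3 - 1 := by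
    rw [List.length_drop]
    by_cases h3 : 3 < s.length
    · rw [if_pos (by exact_mod_cast Nat.sub_pos_of_lt h3)]
      omega
    · rw [if_neg (by simp; omega)]
      omega
  rw [hcnt, hcnt']
  rw [show (s.length + 2) / 3 = ((s.length + 2) / 3 - 1) + 1 by omega]
  rw [List.range_succ_eq_map]
  simp only [List.map_cons, List.map_map]
  rw [show (s.length + 2) / 3 - 1 + 1 - 1 = (s.length + 2) / 3 - 1 by omega]
  congr 1
  · -- head: slice s 0 3 = take 3 s
    norm_num
    rw [show ((3:Int)) = ((3:Nat):Int) from rfl, PySem.List.slice_to_natCast]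
  · -- tail
    apply List.map_congr_left
    intro k _
    simp only [Function.comp]
    have e1 : (0:Int) + 3 * ((k.succ : Nat) : Int) = ((3*k+3 : Nat) : Int) := by push_cast [Nat.succ_eq_add_one]; ring
    have e2 : ((3*k+3 : Nat) : Int) + 3 = ((3*k+6 : Nat) : Int) := by push_cast; ring
    have e3 : (0:Int) + 3 * (↑k:Int) = ((3*k : Nat) : Int) := by push_cast; ring
    have e4 : (0:Int) + 3 * (↑k:Int) + 3 = ((3*k+3 : Nat) : Int) := by push_cast; ring
    rw [e1, e2, e4, e3, PySem.List.slice_natCast, PySem.List.slice_natCast, List.drop_drop]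
    rw [show 3*k+6-(3*k+3)=3 by omega, show 3+3*k = 3*k+3 by omega, show 3*k+3-3*k = 3 by omega]

-- pvScan with a shifted start index
theorem pvScan_shift (l : List (List Char)) (i : Nat) :
    pvScan l i = (pvScan l 0).map (· + i) := by
  induction l generalizing i with
  | nil => simp [pvScan]
  | cons c rest ih =>
    simp only [pvScan]
    split_ifs with h1 h2
    · simp
    · simp
    · rw [ih (i + 1), ih 1]
      cases pvScan rest 0
      · simp
      · simp
        omega

theorem pvNextStop_none (g : List Char) (p : Nat) (h : ¬ p < g.length) :
    pvNextStop g p = none := by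
  rw [pvNextStop]; simp [h]

theorem pvNextStart_none (g : List Char) (p : Nat) (h : ¬ p < g.length) :
    pvNextStart g p = none := by
  rw [pvNextStart]; simp [h]

theorem pvNextStop_spec (g : List Char) :
    ∀ n p q, g.length - p ≤ n → pvNextStop g p = some q →
      p ≤ q ∧ q < g.length ∧ 3 ∣ (q - p) ∧ pvCodon g q ∈ pvStops := by
  intro n
  induction n with
  | zero =>
    intro p q hn hq
    rw [pvNextStop, dif_neg (by omega : ¬ p < g.length)] at hq
    cases hq
  | succ n ih =>
    intro p q hn hq
    rw [pvNextStop] at hq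
    by_cases hp : p < g.length
    · rw [dif_pos hp] at hq
      by_cases hc : pvCodon g p ∈ pvStops
      · rw [if_pos hc] at hq
        cases hq
        exact ⟨le_refl _, hp, ⟨0, by omega⟩, hc⟩
      · rw [if_neg hc] at hq
        obtain ⟨h1, h2, h3, h4⟩ := ih (p + 3) q (by omega) hq
        exact ⟨by omega, h2, by omega, h4⟩
    · rw [dif_neg hp] at hq
      cases hq

theorem pvNextStart_spec (g : List Char) :
    ∀ n p r, g.length - p ≤ n → pvNextStart g p = some r →
      p ≤ r ∧ pvCodon g r = pvATG := by
  intro n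
  induction n with
  | zero =>
    intro p r hn hq
    rw [pvNextStart, dif_neg (by omega : ¬ p < g.length)] at hq
    cases hq
  | succ n ih =>
    intro p r hn hq
    rw [pvNextStart] at hq
    by_cases hp : p < g.length
    · rw [dif_pos hp] at hq
      by_cases hc : pvCodon g p = pvATG
      · rw [if_pos hc] at hq
        cases hq
        exact ⟨le_refl _, hc⟩
      · rw [if_neg hc] at hq
        obtain ⟨h1, h2⟩ := ih (p + 3) r (by omega) hq
        exact ⟨by omega, h2⟩
    · rw [dif_neg hp] at hq
      cases hq

-- A's scan over the codons of the suffix starting at p, characterised by B's tables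
def pvDec (g : List Char) (p : Nat) : Option Nat :=
  match pvNextStop g p, pvNextStart g p with
  | none, _ => none
  | some q, none => some ((q - p) / 3)
  | some q, some r => if r < q then none else some ((q - p) / 3)

theorem pvScan_eq (g : List Char) :
    ∀ n p, g.length - p ≤ n → pvScan (pvChunks (g.drop p)) 0 = pvDec g p := by
  intro n
  induction n with
  | zero =>
    intro p hn
    rw [List.drop_eq_nil_of_le (by omega), pvChunks_nil]
    unfold pvDec
    rw [pvNextStop_none g p (by omega)]
    rfl
  | succ n ih =>
    intro p hn
    by_cases hp : p < g.length
    · have hs : g.drop p ≠ [] := by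
        simp only [ne_eq, List.drop_eq_nil_iff]; omega
      rw [pvChunks_cons _ hs]
      have htake : (g.drop p).take 3 = pvCodon g p := (pvCodon_eq g p).symm
      have hdrop : (g.drop p).drop 3 = g.drop (p + 3) := by
        rw [List.drop_drop]
      rw [htake, hdrop]
      by_cases hA : pvCodon g p = pvATG
      · have hstart : pvNextStart g p = some p := by
          rw [pvNextStart, dif_pos hp, if_pos hA]
        have hstop : pvNextStop g p = pvNextStop g (p + 3) := by
          rw [pvNextStop, dif_pos hp, if_neg (by rw [hA]; decide)]
        simp only [pvScan, if_pos hA]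
        unfold pvDec
        rw [hstop, hstart]
        cases hq : pvNextStop g (p + 3) with
        | none => rfl
        | some q =>
          obtain ⟨h1, h2, h3, h4⟩ := pvNextStop_spec g g.length (p + 3) q (by omega) hq
          show none = if p < q then none else some ((q - p) / 3)
          rw [if_pos (by omega : p < q)]
      · by_cases hB : pvCodon g p ∈ pvStops
        · have hstop : pvNextStop g p = some p := by
            rw [pvNextStop, dif_pos hp, if_pos hB]
          have hstart : pvNextStart g p = pvNextStart g (p + 3) := by
            rw [pvNextStart, dif_pos hp, if_neg hA]
          simp only [pvScan, if_neg hA, if_pos hB]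
          unfold pvDec
          rw [hstop, hstart]
          cases hr : pvNextStart g (p + 3) with
          | none =>
            show some 0 = some ((p - p) / 3)
            simp
          | some r =>
            obtain ⟨h1, h2⟩ := pvNextStart_spec g g.length (p + 3) r (by omega) hr
            show some 0 = if r < p then none else some ((p - p) / 3)
            rw [if_neg (by omega : ¬ r < p)]
            simp
        · have hstop : pvNextStop g p = pvNextStop g (p + 3) := by
            rw [pvNextStop, dif_pos hp, if_neg hB]
          have hstart : pvNextStart g p = pvNextStart g (p + 3) := by
            rw [pvNextStart, dif_pos hp, if_neg hA]
          simp only [pvScan, if_neg hA, if_neg hB]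
          rw [pvScan_shift _ 1, ih (p + 3) (by omega)]
          unfold pvDec
          rw [hstop, hstart]
          cases hq : pvNextStop g (p + 3) with
          | none => rfl
          | some q =>
            obtain ⟨h1, h2, h3, h4⟩ := pvNextStop_spec g g.length (p + 3) q (by omega) hq
            cases hr : pvNextStart g (p + 3) with
            | none =>
              show (some ((q - (p + 3)) / 3)).map (· + 1) = some ((q - p) / 3)
              simp only [Option.map_some]
              congr 1
              omega
            | some r =>
              show (if r < q then none else some ((q - (p + 3)) / 3)).map (· + 1)
                  = if r < q then none else some ((q - p) / 3)
              by_cases hrq : r < q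
              · rw [if_pos hrq, if_pos hrq]
                rfl
              · rw [if_neg hrq, if_neg hrq]
                simp only [Option.map_some]
                congr 1
                omega
    · rw [List.drop_eq_nil_of_le (by omega), pvChunks_nil]
      unfold pvDec
      rw [pvNextStop_none g p hp]
      rfl

theorem pvFlatten_take_chunks : ∀ (e : Nat) (s : List Char),
    ((pvChunks s).take e).flatten = s.take (3 * e) := by
  intro e
  induction e with
  | zero => simp
  | succ e ih =>
    intro s
    by_cases hs : s = []
    · subst hs; simp [pvChunks_nil]
    · rw [pvChunks_cons s hs, List.take_succ_cons, List.flatten_cons, ih (s.drop 3),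
        show 3 * (e + 1) = 3 + 3 * e by ring, List.take_add]

-- A's findGene on the suffix starting at p, characterised by B's tables
def pvDecG (g : List Char) (p : Nat) : Option (List Char) :=
  match pvNextStop g p, pvNextStart g p with
  | none, _ => none
  | some q, none => if q = p then none else some ((g.drop p).take (q - p))
  | some q, some r =>
    if r < q then none else if q = p then none else some ((g.drop p).take (q - p))

-- the endIndex→gene step of A's findGene, for the stop position q delivered by B's table
theorem pvGeneVal (g : List Char) (p q : Nat) (h1 : p ≤ q) (h2 : q < g.length) (h3 : 3 ∣ (q - p)) :
    (if (PySem.List.slice (pvChunks (g.drop p)) (some 0) (some (((q - p) / 3 : Nat) : Int))).length = 0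
     then none
     else some (PySem.List.slice (pvChunks (g.drop p)) (some 0) (some (((q - p) / 3 : Nat) : Int))).flatten)
    = if q = p then (none : Option (List Char)) else some ((g.drop p).take (q - p)) := by
  have hs : g.drop p ≠ [] := by simp only [ne_eq, List.drop_eq_nil_iff]; omega
  rw [PySem.List.slice_zero_start, PySem.List.slice_to_natCast]
  by_cases hqp : q = p
  · subst hqp
    simp
  · have he : 1 ≤ (q - p) / 3 := by omega
    have hlen1 : 1 ≤ (pvChunks (g.drop p)).length := by
      rw [pvChunks_cons _ hs]; simp
    rw [if_neg (by rw [List.length_take]; omega), if_neg hqp, pvFlatten_take_chunks]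
    congr 2
    omega

theorem pvFindGene_eq (g : List Char) (p : Nat) :
    pvFindGene (g.drop p) = pvDecG g p := by
  unfold pvFindGene
  simp only []
  rw [pvScan_eq g g.length p (by omega)]
  unfold pvDec pvDecG
  cases hq : pvNextStop g p with
  | none => rfl
  | some q =>
    obtain ⟨h1, h2, h3, h4⟩ := pvNextStop_spec g g.length p q (by omega) hq
    cases hr : pvNextStart g p with
    | none =>
      show (if (PySem.List.slice (pvChunks (g.drop p)) (some 0) (some (((q - p) / 3 : Nat) : Int))).length = 0
            then none
            else some (PySem.List.slice (pvChunks (g.drop p)) (some 0) (some (((q - p) / 3 : Nat) : Int))).flatten)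
          = if q = p then none else some ((g.drop p).take (q - p))
      exact pvGeneVal g p q h1 h2 h3
    | some r =>
      by_cases hrq : r < q
      · show (match (if r < q then none else some ((q - p) / 3) : Option Nat) with
              | none => (none : Option (List Char))
              | some e =>
                if (PySem.List.slice (pvChunks (g.drop p)) (some 0) (some ((e : Nat) : Int))).length = 0
                then none
                else some (PySem.List.slice (pvChunks (g.drop p)) (some 0) (some ((e : Nat) : Int))).flatten)
            = if r < q then none else if q = p then none else some ((g.drop p).take (q - p))
        rw [if_pos hrq, if_pos hrq]
      · show (match (if r < q then none else some ((q - p) / 3) : Option Nat) with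
              | none => (none : Option (List Char))
              | some e =>
                if (PySem.List.slice (pvChunks (g.drop p)) (some 0) (some ((e : Nat) : Int))).length = 0
                then none
                else some (PySem.List.slice (pvChunks (g.drop p)) (some 0) (some ((e : Nat) : Int))).flatten)
            = if r < q then none else if q = p then none else some ((g.drop p).take (q - p))
        rw [if_neg hrq, if_neg hrq]
        exact pvGeneVal g p q h1 h2 h3

theorem pvGuard_stop (g : List Char) (p : Nat) :
    (if p < g.length then pvNextStop g p else none) = pvNextStop g p := by
  split_ifs with h
  · rfl
  · rw [pvNextStop_none g p h]

theorem pvGuard_start (g : List Char) (p : Nat) :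
    (if p < g.length then pvNextStart g p else none) = pvNextStart g p := by
  split_ifs with h
  · rfl
  · rw [pvNextStart_none g p h]

theorem pvLoop_eq (g : List Char) :
    ∀ n i acc, g.length - i ≤ n → pvLoopA g i acc = pvLoopB g i acc := by
  intro n
  induction n with
  | zero =>
    intro i acc hn
    rw [pvLoopA, pvLoopB, dif_neg (by omega : ¬ i < g.length), dif_neg (by omega : ¬ i < g.length)]
  | succ n ih =>
    intro i acc hn
    rw [pvLoopA, pvLoopB]
    by_cases hi : i < g.length
    · rw [dif_pos hi, dif_pos hi]
      by_cases hA : pvCodon g i = pvATG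
      · rw [if_pos hA, if_pos hA]
        have hsl : PySem.List.slice g (some ((i + 3 : Nat) : Int)) (some (g.length : Int)) = g.drop (i + 3) := by
          rw [show ((g.length : Int)) = (((g.length : Nat) : Int)) from rfl, PySem.List.slice_natCast]
          exact List.take_of_length_le (by rw [List.length_drop])
        rw [hsl, pvFindGene_eq g (i + 3)]
        unfold pvDecG
        show _ = (match (if i + 3 < g.length then pvNextStop g (i + 3) else none) with
          | some q =>
            if decide (i + 3 < q) &&
                (match (if i + 3 < g.length then pvNextStart g (i + 3) else none) with
                 | none => true
                 | some r => decide (q < r)) then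
              pvLoopB g (i + (PySem.List.slice g (some ((i + 3 : Nat) : Int)) (some ((q : Nat) : Int))).length + 1)
                (acc ++ [PySem.List.slice g (some ((i + 3 : Nat) : Int)) (some ((q : Nat) : Int))])
            else pvLoopB g (i + 1) acc
          | none => pvLoopB g (i + 1) acc)
        rw [pvGuard_stop, pvGuard_start]
        cases hq : pvNextStop g (i + 3) with
        | none => exact ih (i + 1) acc (by omega)
        | some q =>
          obtain ⟨h1, h2, h3, h4⟩ := pvNextStop_spec g g.length (i + 3) q (by omega) hq
          have hgene : PySem.List.slice g (some ((i + 3 : Nat) : Int)) (some ((q : Nat) : Int))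
              = (g.drop (i + 3)).take (q - (i + 3)) := PySem.List.slice_natCast g (i + 3) q
          have hglen : ((g.drop (i + 3)).take (q - (i + 3))).length = q - (i + 3) := by
            rw [List.length_take, List.length_drop]; omega
          cases hr : pvNextStart g (i + 3) with
          | none =>
            simp only []
            by_cases hpq : i + 3 < q
            · rw [if_neg (by omega : ¬ q = i + 3)]
              rw [if_pos (by simp [hpq])]
              rw [hgene]
              simp only []
              rw [hglen]
              exact ih (i + (q - (i + 3)) + 1)
                (acc ++ [(g.drop (i + 3)).take (q - (i + 3))]) (by omega)
            · rw [if_pos (by omega : q = i + 3)]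
              rw [if_neg (by simp; omega)]
              exact ih (i + 1) acc (by omega)
          | some r =>
            obtain ⟨h5, h6⟩ := pvNextStart_spec g g.length (i + 3) r (by omega) hr
            simp only []
            have hrne : r ≠ q := by
              intro hcontra
              rw [hcontra] at h6
              rw [h6] at h4
              exact absurd h4 (by decide)
            by_cases hrq : r < q
            · rw [if_pos hrq]
              rw [if_neg (by simp; omega)]
              exact ih (i + 1) acc (by omega)
            · rw [if_neg hrq]
              by_cases hpq : i + 3 < q
              · rw [if_neg (by omega : ¬ q = i + 3)]
                rw [if_pos (by simp; omega)]
                rw [hgene]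
                simp only []
                rw [hglen]
                exact ih (i + (q - (i + 3)) + 1)
                  (acc ++ [(g.drop (i + 3)).take (q - (i + 3))]) (by omega)
              · rw [if_pos (by omega : q = i + 3)]
                rw [if_neg (by simp; omega)]
                exact ih (i + 1) acc (by omega)
      · rw [if_neg hA, if_neg hA]
        exact ih (i + 1) acc (by omega)
    · rw [dif_neg hi, dif_neg hi]

-- ===== VERDICT (by name: the statement is the Claim_ definition above) =====
theorem findGenes_spec : Claim_equal_findGenes := by
  intro genome _
  unfold Spec_findGenes findGenes findGenes_alt
  rw [pvLoop_eq genome.toList genome.toList.length 0 [] (by omega)]
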